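-- pv_equiv track=rewrite | github.com/sahilsharma2184/MyWays-Assignment | document_processing.py | extract_finance_data
-- ===== SOURCE A (Python) =====
-- def extract_finance_data(textract_response):
--     """Extract finance-specific data: Vendor Name, Account Number, Total Amount."""
--     finance_data = {
--         'Vendor Name': None,
--         'Account Number': None,
--         'Total Amount': None
--     }
--
--     for line in textract_response:
--         if 'Vendor Name' in line:
--             finance_data['Vendor Name'] = line.split(':')[-1].strip()
--         if 'Account Number' in line:
--             finance_data['Account Number'] = line.split(':')[-1].strip()
--         if 'Total Amount' in line or 'Amount Due' in line:
--             finance_data['Total Amount'] = line.split(':')[-1].strip()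
--
--     return finance_data
-- ===== SOURCE B (Python) =====
-- def extract_finance_data(textract_response):
--     """Extract finance-specific data: Vendor Name, Account Number, Total Amount."""
--     vendor = account = total = None
--     remaining = 3
--     for line in reversed(list(textract_response)):
--         if vendor is None and 'Vendor Name' in line:
--             vendor = line.split(':')[-1].strip()
--             remaining -= 1
--         if account is None and 'Account Number' in line:
--             account = line.split(':')[-1].strip()
--             remaining -= 1
--         if total is None and ('Total Amount' in line or 'Amount Due' in line):
--             total = line.split(':')[-1].strip()
--             remaining -= 1
--         if remaining == 0:
--             break
--     return {'Vendor Name': vendor, 'Account Number': account, 'Total Amount': total}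
-- ===== Notes on version B (the rewrite author's own statement) =====
-- stated objective: alternative
-- what changed: A scans forward unconditionally overwriting each field on every hit; B scans the materialized lines in reverse, assigns a field only while it is still unset (first reverse hit = last occurrence), tracks how many fields remain unset and breaks as soon as all three are filled.
import Mathlib
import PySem

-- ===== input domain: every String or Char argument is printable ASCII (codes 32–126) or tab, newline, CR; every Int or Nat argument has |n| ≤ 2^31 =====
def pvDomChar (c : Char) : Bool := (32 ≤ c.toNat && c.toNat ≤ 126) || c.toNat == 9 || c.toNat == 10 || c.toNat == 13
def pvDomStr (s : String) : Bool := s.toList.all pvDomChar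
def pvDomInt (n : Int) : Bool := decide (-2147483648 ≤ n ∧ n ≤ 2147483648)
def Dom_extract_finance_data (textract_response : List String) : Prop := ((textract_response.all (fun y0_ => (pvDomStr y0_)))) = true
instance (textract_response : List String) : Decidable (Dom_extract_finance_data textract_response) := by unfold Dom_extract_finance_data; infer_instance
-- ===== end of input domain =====

-- B scans the lines in reverse with "assign only if still unset" and an early break once all
-- three fields are filled (first reverse hit = last original occurrence); objective: alternative.


-- line.split(':')[-1].strip() — the separator ':' is non-empty so split? is always `some`,
-- and the result is a non-empty list so the [-1] index never raises; both defaults are unreachable.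
def pvSeg (line : String) : String :=
  PySem.Str.strip (PySem.List.pyGetD ((PySem.Str.split? line ":").getD []) (-1) "")

-- ===== PORT A =====
-- A's dict has three fixed keys assigned in place (insertion order never changes), so it is
-- carried as the triple of its values and rebuilt, in key order, at the return.
def extract_finance_data (textract_response : List String) : List (String × Option String) :=
  let st := textract_response.foldl
    (fun (fd : Option String × Option String × Option String) line =>
      let fd := if PySem.Str.isIn "Vendor Name" line then (some (pvSeg line), fd.2.1, fd.2.2) else fd
      let fd := if PySem.Str.isIn "Account Number" line then (fd.1, some (pvSeg line), fd.2.2) else fd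
      let fd := if PySem.Str.isIn "Total Amount" line || PySem.Str.isIn "Amount Due" line
                then (fd.1, fd.2.1, some (pvSeg line)) else fd
      fd)
    (none, none, none)
  [("Vendor Name", st.1), ("Account Number", st.2.1), ("Total Amount", st.2.2)]

-- ===== PORT B =====
def pvLoopB : List String → Option String → Option String → Option String → Int →
    Option String × Option String × Option String
  | [], vendor, account, total, _ => (vendor, account, total)
  | line :: rest, vendor, account, total, remaining =>
    let (vendor, remaining) :=
      if vendor.isNone && PySem.Str.isIn "Vendor Name" line then (some (pvSeg line), remaining - 1)
      else (vendor, remaining)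
    let (account, remaining) :=
      if account.isNone && PySem.Str.isIn "Account Number" line then (some (pvSeg line), remaining - 1)
      else (account, remaining)
    let (total, remaining) :=
      if total.isNone && (PySem.Str.isIn "Total Amount" line || PySem.Str.isIn "Amount Due" line)
      then (some (pvSeg line), remaining - 1)
      else (total, remaining)
    if remaining = 0 then (vendor, account, total)
    else pvLoopB rest vendor account total remaining

def extract_finance_data_alt (textract_response : List String) : List (String × Option String) :=
  let st := pvLoopB textract_response.reverse none none none 3
  [("Vendor Name", st.1), ("Account Number", st.2.1), ("Total Amount", st.2.2)]

-- ===== PRECONDITION & SPEC =====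
def Spec_extract_finance_data (textract_response : List String) (out : List (String × Option String)) : Prop := out = extract_finance_data_alt textract_response
instance (textract_response : List String) (out : List (String × Option String)) : Decidable (Spec_extract_finance_data textract_response out) := by unfold Spec_extract_finance_data; infer_instance

-- ===== CLAIM (what is proved, stated in full; the proofs are below) =====
def Claim_equal_extract_finance_data : Prop := ∀ (textract_response : List String), Dom_extract_finance_data textract_response → Spec_extract_finance_data textract_response (extract_finance_data textract_response)

-- ===== LEMMAS AND PROOFS =====

-- number of unset fields (B's `remaining` invariant)
def pvCnt (v a t : Option String) : Int :=
  (if v.isNone then 1 else 0) + (if a.isNone then 1 else 0) + (if t.isNone then 1 else 0)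

-- generic copy of B's loop, with the three substring tests and the value extractor abstracted
def pvLoopG (f g h : String → Bool) (sg : String → String) :
    List String → Option String → Option String → Option String → Int →
    Option String × Option String × Option String
  | [], v, a, t, _ => (v, a, t)
  | line :: rest, v, a, t, r =>
    let (v, r) := if v.isNone && f line then (some (sg line), r - 1) else (v, r)
    let (a, r) := if a.isNone && g line then (some (sg line), r - 1) else (a, r)
    let (t, r) := if t.isNone && h line then (some (sg line), r - 1) else (t, r)
    if r = 0 then (v, a, t) else pvLoopG f g h sg rest v a t r

theorem pvLoopB_eq_G (ls : List String) (v a t : Option String) (r : Int) :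
    pvLoopB ls v a t r =
      pvLoopG (fun l => PySem.Str.isIn "Vendor Name" l)
              (fun l => PySem.Str.isIn "Account Number" l)
              (fun l => PySem.Str.isIn "Total Amount" l || PySem.Str.isIn "Amount Due" l)
              pvSeg ls v a t r := by
  induction ls generalizing v a t r with
  | nil => rfl
  | cons line rest ih => rw [pvLoopB, pvLoopG]; simp only [ih]

-- the loop with break, characterised: each field is its old value, else the first hit
theorem pvLoopG_spec (f g h : String → Bool) (sg : String → String) (ls : List String) :
    ∀ (v a t : Option String) (r : Int), r = pvCnt v a t →
      pvLoopG f g h sg ls v a t r =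
        (v.or ((ls.find? f).map sg), a.or ((ls.find? g).map sg), t.or ((ls.find? h).map sg)) := by
  induction ls with
  | nil => intro v a t r _; simp [pvLoopG]
  | cons line rest ih =>
    intro v a t r hr; subst hr
    rw [pvLoopG]
    cases v <;> cases a <;> cases t <;>
      cases hF : f line <;> cases hG : g line <;> cases hH : h line <;>
        · simp [hF, hG, hH, List.find?, pvCnt] <;>
            first
            | rfl
            | exact ih _ _ _ _ (by simp [pvCnt])

-- A's fold, characterised: each field is the LAST hit (= first hit of the reversed list)
theorem pvFold_spec (f g h : String → Bool) (sg : String → String) (ls : List String)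
    (v a t : Option String) :
    ls.foldl
      (fun (fd : Option String × Option String × Option String) line =>
        let fd := if f line then (some (sg line), fd.2.1, fd.2.2) else fd
        let fd := if g line then (fd.1, some (sg line), fd.2.2) else fd
        let fd := if h line then (fd.1, fd.2.1, some (sg line)) else fd
        fd) (v, a, t) =
      (((ls.reverse.find? f).map sg).or v,
       ((ls.reverse.find? g).map sg).or a,
       ((ls.reverse.find? h).map sg).or t) := by
  induction ls generalizing v a t with
  | nil => simp
  | cons line rest ih =>
    simp only [List.foldl_cons, List.reverse_cons, ih]
    rw [List.find?_append, List.find?_append, List.find?_append]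
    cases hF : f line <;> cases hG : g line <;> cases hH : h line <;>
      cases hfV : rest.reverse.find? f <;> cases hfA : rest.reverse.find? g <;>
        cases hfT : rest.reverse.find? h <;>
          simp [hF, hG, hH, List.find?, Option.or]

-- ===== VERDICT (by name: the statement is the Claim_ definition above) =====
theorem extract_finance_data_spec : Claim_equal_extract_finance_data := by
  intro tr _
  show extract_finance_data tr = extract_finance_data_alt tr
  unfold extract_finance_data extract_finance_data_alt
  rw [pvLoopB_eq_G,
      pvLoopG_spec _ _ _ _ _ none none none 3 (by simp [pvCnt]),
      pvFold_spec (fun l => PySem.Str.isIn "Vendor Name" l)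
                  (fun l => PySem.Str.isIn "Account Number" l)
                  (fun l => PySem.Str.isIn "Total Amount" l || PySem.Str.isIn "Amount Due" l)
                  pvSeg]
  simp [Option.or_none, Option.none_or]
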